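-- pv_equiv track=rewrite | github.com/JRobsonJr/Codeforces | 0121A.py | solve
-- ===== SOURCE A (Python) =====
-- def generate_lucky_numbers():
--     lucky_digits = ['4', '7']
--     lucky_numbers = []
--     curr_appenders = [4, 7]
--     for _ in range(10):
--         lucky_numbers.extend(curr_appenders)
--         curr_appenders = [int(ld + str(ca)) for ld in lucky_digits for ca in curr_appenders]
--     return lucky_numbers
--
-- def get_next_lucky_number_index(lucky_numbers, query):
--     index = 0
--     while lucky_numbers[index] < query:
--         index += 1
--     return index
--
-- def solve(l, r):
--     lucky_numbers = generate_lucky_numbers()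
--     lucky_pointer = get_next_lucky_number_index(lucky_numbers, l)
--     if get_next_lucky_number_index(lucky_numbers, r) == lucky_pointer:
--         return lucky_numbers[lucky_pointer] * (r - l + 1)
--     else:
--         lucky_pointer = get_next_lucky_number_index(lucky_numbers, l)
--         lucky_sum = lucky_numbers[lucky_pointer] * (lucky_numbers[lucky_pointer] - l + 1)
--         lucky_pointer += 1
--         while lucky_numbers[lucky_pointer] < r:
--             lucky_sum += lucky_numbers[lucky_pointer] * (min(lucky_numbers[lucky_pointer], r) - lucky_numbers[lucky_pointer - 1])
--             lucky_pointer += 1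
--
--         lucky_sum += lucky_numbers[lucky_pointer] * (r - lucky_numbers[lucky_pointer - 1])
--
--         return lucky_sum
-- ===== SOURCE B (Python) =====
-- def fours(k):
--     return 0 if k == 0 else 4 * 10 ** (k - 1) + fours(k - 1)
--
-- def smallest_lucky_of_len(k, t):
--     # smallest value of a {4,7}-digit string of exactly k digits that is >= t, or None
--     if k == 0:
--         return 0 if t <= 0 else None
--     p = 10 ** (k - 1)
--     hd, tl = divmod(t, p)
--     if hd < 4:
--         return fours(k)
--     if hd == 4:
--         y = smallest_lucky_of_len(k - 1, tl)
--         return 4 * p + y if y is not None else 7 * p + fours(k - 1)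
--     if hd < 7:
--         return 7 * p + fours(k - 1)
--     if hd == 7:
--         y = smallest_lucky_of_len(k - 1, tl)
--         return 7 * p + y if y is not None else None
--     return None
--
-- def next_lucky(x):
--     for k in range(1, 11):
--         y = smallest_lucky_of_len(k, x)
--         if y is not None:
--             return y
--     return None
--
-- def solve(l, r):
--     total = 0
--     x = l
--     while x <= r:
--         nl = next_lucky(x)
--         total += nl * (min(r, nl) - x + 1)
--         x = nl + 1
--     return total
-- ===== Notes on version B (the rewrite author's own statement) =====
-- stated objective: alternative
-- what changed: B has no lucky-number table at all: instead of A's string-built list of all 2046 lucky numbers and linear index scans over it, B computes the successor lucky number of the current position directly by a digit-greedy divmod recursion and jumps from bucket to bucket inside [l, r], so it only ever visits the lucky numbers that intersect the query range.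
-- outside the precondition, e.g. on solve(3, 1): A returns -4, B returns 0
import Mathlib
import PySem

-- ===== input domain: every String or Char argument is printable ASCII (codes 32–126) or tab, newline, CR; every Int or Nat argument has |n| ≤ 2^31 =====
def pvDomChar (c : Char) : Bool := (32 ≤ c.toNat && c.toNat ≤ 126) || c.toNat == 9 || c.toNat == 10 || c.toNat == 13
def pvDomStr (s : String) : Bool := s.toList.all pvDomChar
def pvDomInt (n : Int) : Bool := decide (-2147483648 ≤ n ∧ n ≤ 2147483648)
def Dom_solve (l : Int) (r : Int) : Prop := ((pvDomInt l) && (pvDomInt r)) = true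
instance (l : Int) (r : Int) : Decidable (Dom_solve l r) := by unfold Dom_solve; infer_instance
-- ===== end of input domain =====

-- B drops A's precomputed lucky-number table entirely: it computes the successor lucky number of the
-- current position directly by a digit-greedy divmod recursion and jumps bucket to bucket (objective: alternative).

-- ===== PORT A =====
-- lucky_digits = ['4', '7'] (strings ported as List Char so the concatenation int(ld + str(ca)) is kernel-exact)
def pvLuckyDigits : List (List Char) := [['4'], ['7']]

-- generate_lucky_numbers(): fold over range(10) carrying (lucky_numbers, curr_appenders);
-- int(ld + str(ca)) ported as PySem.Int.ofChars? (ld ++ PySem.Int.toChars ca); it never fails here, .getD 0 discharges the Option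
def pvGenerateLucky : List Int :=
  ((List.range 10).foldl (fun (st : List Int × List Int) _ =>
      (st.1 ++ st.2,
       pvLuckyDigits.flatMap (fun ld =>
         st.2.map (fun ca => (PySem.Int.ofChars? (ld ++ PySem.Int.toChars ca)).getD 0))))
    ([], [4, 7])).1

-- get_next_lucky_number_index: 'while lucky_numbers[index] < query: index += 1' as structural
-- recursion on the suffix starting at index ([] = IndexError; unreachable on Dom, where query ≤ 2^31 < 4444444444)
def pvGetNext : List Int → Int → Nat
  | [], _ => 0
  | x :: xs, q => if x < q then pvGetNext xs q + 1 else 0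

-- the else-branch while loop plus the trailing line, as recursion on the suffix from lucky_pointer,
-- with prev = lucky_numbers[lucky_pointer - 1] ([] = IndexError; unreachable on Dom)
def pvAWhile : List Int → Int → Int → Int
  | [], _, _ => 0
  | x :: xs, prev, r => if x < r then x * (min x r - prev) + pvAWhile xs x r else x * (r - prev)

def pvSolveCore (lucky : List Int) (l r : Int) : Int :=
  let p := pvGetNext lucky l
  if pvGetNext lucky r = p then
    (PySem.List.pyGet? lucky (p : Int)).getD 0 * (r - l + 1)
  else
    let p2 := pvGetNext lucky l
    let lp := (PySem.List.pyGet? lucky (p2 : Int)).getD 0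
    lp * (lp - l + 1) + pvAWhile (lucky.drop (p2 + 1)) lp r

def solve (l : Int) (r : Int) : Int := pvSolveCore pvGenerateLucky l r

-- ===== PORT B =====
-- fours(k) = the k-digit number 44…4
def pvFours : Nat → Int
  | 0 => 0
  | k + 1 => 4 * 10 ^ k + pvFours k

-- smallest_lucky_of_len(k, t): smallest value of a {4,7}-string of exactly k digits that is ≥ t, None if none;
-- divmod(t, p) ported as PySem.Int.floordiv / PySem.Int.mod (p = 10^(k-1) > 0, so exact)
def pvG : Nat → Int → Option Int
  | 0, t => if t ≤ 0 then some 0 else none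
  | k + 1, t =>
    let p : Int := 10 ^ k
    let hd := PySem.Int.floordiv t p
    let tl := PySem.Int.mod t p
    if hd < 4 then some (pvFours (k + 1))
    else if hd = 4 then
      match pvG k tl with
      | some y => some (4 * p + y)
      | none => some (7 * p + pvFours k)
    else if hd < 7 then some (7 * p + pvFours k)
    else if hd = 7 then
      match pvG k tl with
      | some y => some (7 * p + y)
      | none => none
    else none

-- next_lucky(x): first k in range(1, 11) whose smallest_lucky_of_len is not None (early return = findSome?)
def pvNextLucky (x : Int) : Option Int :=
  (List.range' 1 10).findSome? (fun k => pvG k x)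

-- termination lemmas for the while loop below (the port cites pvNextLucky_ge in decreasing_by)
theorem pvFours_nonneg : ∀ k, 0 ≤ pvFours k
  | 0 => le_refl 0
  | k + 1 => by
    have h10 : (0:Int) < 10 ^ k := pow_pos (by norm_num) k
    have := pvFours_nonneg k
    simp only [pvFours]; omega

theorem pvG_ge : ∀ (k : Nat) (t y : Int), pvG k t = some y → t ≤ y
  | 0, t, y => by
    simp only [pvG]
    split_ifs with h
    · intro hy; injection hy with hy; omega
    · intro hy; cases hy
  | k + 1, t, y => by
    intro h
    have hp : (0:Int) < 10 ^ k := pow_pos (by norm_num) k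
    have hmod := PySem.Int.floordiv_mul_add_mod t (10 ^ k)
    have hmn := PySem.Int.mod_nonneg t hp
    have hml := PySem.Int.mod_lt t hp
    have hf := pvFours_nonneg k
    simp only [pvG] at h
    split_ifs at h with h1 h2 h3 h4
    · -- hd < 4 : t < 4 * 10^k ≤ pvFours (k+1)
      cases h
      have ht : t < 4 * 10 ^ k := (PySem.Int.floordiv_lt_iff_lt_mul hp).mp h1
      simp only [pvFours]; omega
    · -- hd = 4
      rw [h2] at hmod
      cases hg : pvG k (PySem.Int.mod t (10 ^ k)) with
      | some z =>
        rw [hg] at h; cases h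
        have := pvG_ge k _ _ hg
        omega
      | none => rw [hg] at h; cases h; omega
    · -- hd = 5 or 6 : t < 7 * 10^k
      cases h
      have ht : t < 7 * 10 ^ k := (PySem.Int.floordiv_lt_iff_lt_mul hp).mp (by omega)
      omega
    · -- hd = 7
      rw [h4] at hmod
      cases hg : pvG k (PySem.Int.mod t (10 ^ k)) with
      | some z =>
        rw [hg] at h; cases h
        have := pvG_ge k _ _ hg
        omega
      | none => rw [hg] at h; cases h

theorem pvNextLucky_ge (x y : Int) (h : pvNextLucky x = some y) : x ≤ y := by
  obtain ⟨k, -, hk⟩ := List.exists_of_findSome?_eq_some h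
  exact pvG_ge k x y hk

-- the while loop: total accumulates, x jumps to next_lucky(x) + 1
-- (none branch: Python raises TypeError there; unreachable for x ≤ r ≤ 2^31 inside Dom)
def pvLoop (total x r : Int) : Int :=
  if _hx : x ≤ r then
    match h : pvNextLucky x with
    | none => total
    | some nl => pvLoop (total + nl * (min r nl - x + 1)) (nl + 1) r
  else total
termination_by (r + 1 - x).toNat
decreasing_by
  have := pvNextLucky_ge x nl h
  omega

def solve_alt (l : Int) (r : Int) : Int := pvLoop 0 l r

-- ===== PRECONDITION & SPEC =====
-- Pre_ excludes l > r (an empty/reversed range, which the problem never specifies): A's bucket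
-- formulas there return accidental values while B naturally returns 0, the empty-range sum.
def Pre_solve (l : Int) (r : Int) : Prop := l ≤ r
instance (l : Int) (r : Int) : Decidable (Pre_solve l r) := by unfold Pre_solve; infer_instance
def pvWitness_solve : Int × Int := (4, 10)

def Spec_solve (l : Int) (r : Int) (out : Int) : Prop := out = solve_alt l r
instance (l : Int) (r : Int) (out : Int) : Decidable (Spec_solve l r out) := by unfold Spec_solve; infer_instance

-- ===== CLAIM (what is proved, stated in full; the proofs are below) =====
def Claim_equal_solve : Prop := ∀ (l : Int) (r : Int), Dom_solve l r → Pre_solve l r → Spec_solve l r (solve l r)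

-- ===== LEMMAS AND PROOFS =====

-- ghost list for the proofs only: the sorted k-digit lucky numbers, and the whole 1..10-digit table
def pvLev : Nat → List Int
  | 0 => [0]
  | k + 1 => (pvLev k).map (fun y => 4 * 10 ^ k + y) ++ (pvLev k).map (fun y => 7 * 10 ^ k + y)

def pvFull : List Int := (List.range' 1 10).flatMap pvLev

-- boolean strict-sortedness checker (linear, so the kernel can evaluate it on the 2046-element table)
def pvChainB : List Int → Bool
  | [] => true
  | [_] => true
  | x :: y :: xs => (decide (x < y) && pvChainB (y :: xs))

theorem pvChainB_pairwise : ∀ (L : List Int), pvChainB L = true → List.Pairwise (· < ·) L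
  | [] , _ => List.Pairwise.nil
  | [x], _ => by simp
  | x :: y :: xs, h => by
    have h' : x < y ∧ pvChainB (y :: xs) = true := by
      simpa [pvChainB, Bool.and_eq_true] using h
    have ih := pvChainB_pairwise (y :: xs) h'.2
    refine List.pairwise_cons.mpr ⟨?_, ih⟩
    intro z hz
    rcases List.mem_cons.mp hz with rfl | hz
    · exact h'.1
    · exact lt_trans h'.1 (List.rel_of_pairwise_cons ih hz)

set_option maxRecDepth 20000 in
theorem pvLists_eq : pvGenerateLucky = pvFull := by decide

set_option maxRecDepth 20000 in
theorem pvFull_chainB : pvChainB pvFull = true := by decide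

theorem pvFull_pairwise : List.Pairwise (· < ·) pvFull :=
  pvChainB_pairwise _ pvFull_chainB

set_option maxRecDepth 20000 in
theorem pvFull_big : (4444444444 : Int) ∈ pvFull := by decide

-- structure of pvLev: nonempty with head pvFours k, all elements in [0, 10^k)
theorem pvLev_head : ∀ k, ∃ rest, pvLev k = pvFours k :: rest
  | 0 => ⟨[], rfl⟩
  | k + 1 => by
    obtain ⟨rest, hr⟩ := pvLev_head k
    exact ⟨rest.map (fun y => 4 * 10 ^ k + y) ++ (pvLev k).map (fun y => 7 * 10 ^ k + y),
      by simp [pvLev, hr, pvFours]⟩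

theorem pvLev_bounds : ∀ k, ∀ y ∈ pvLev k, 0 ≤ y ∧ y < 10 ^ k
  | 0 => by intro y hy; simp [pvLev] at hy; simp [hy]
  | k + 1 => by
    intro y hy
    have hp : (0:Int) < 10 ^ k := pow_pos (by norm_num) k
    simp only [pvLev, List.mem_append, List.mem_map] at hy
    rw [pow_succ]
    rcases hy with ⟨z, hz, rfl⟩ | ⟨z, hz, rfl⟩ <;>
      have := pvLev_bounds k z hz <;> omega

-- pvG computes the first element of pvLev k that is ≥ t
theorem pvG_correct : ∀ (k : Nat) (t : Int),
    pvG k t = (pvLev k).find? (fun y => decide (t ≤ y))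
  | 0, t => by
    simp only [pvG, pvLev, List.find?]
    split_ifs with h
    · simp [h]
    · simp [h]
  | k + 1, t => by
    have hp : (0:Int) < 10 ^ k := pow_pos (by norm_num) k
    have hmod := PySem.Int.floordiv_mul_add_mod t (10 ^ k)
    have hmn := PySem.Int.mod_nonneg t hp
    have hml := PySem.Int.mod_lt t hp
    have hf := pvFours_nonneg k
    obtain ⟨rest, hlev⟩ := pvLev_head k
    have hbnd := pvLev_bounds k
    simp only [pvG, pvLev, List.find?_append, List.find?_map]
    split_ifs with h1 h2 h3 h4
    · -- hd < 4 : t < 4*10^k, head of first half already matches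
      have ht : t < 4 * 10 ^ k := (PySem.Int.floordiv_lt_iff_lt_mul hp).mp h1
      rw [hlev, List.find?_cons_of_pos
        (by simp only [Function.comp_apply, decide_eq_true_eq]; omega)]
      simp [pvFours]
    · -- hd = 4 : t = 4*10^k + tl
      rw [h2] at hmod
      have hcong : ((fun y => decide (t ≤ y)) ∘ (fun y => 4 * 10 ^ k + y))
          = fun y => decide (PySem.Int.mod t (10 ^ k) ≤ y) := by
        funext y; simp only [Function.comp_apply]; congr 1
        simp only [eq_iff_iff]; omega
      rw [hcong, ← pvG_correct k]
      cases hg : pvG k (PySem.Int.mod t (10 ^ k)) with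
      | some z => simp
      | none =>
        -- no k-digit tail works: answer is 7*10^k followed by all fours
        rw [hlev, List.find?_cons_of_pos
          (by simp only [Function.comp_apply, decide_eq_true_eq]; omega)]
        simp
    · -- hd = 5 or 6 : 5*10^k ≤ t < 7*10^k
      have ht1 : 5 * 10 ^ k ≤ t := (PySem.Int.le_floordiv_iff_mul_le hp).mp (by omega)
      have ht2 : t < 7 * 10 ^ k := (PySem.Int.floordiv_lt_iff_lt_mul hp).mp (by omega)
      have hnone : (pvLev k).find? ((fun y => decide (t ≤ y)) ∘ (fun y => 4 * 10 ^ k + y)) = none := by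
        rw [List.find?_eq_none]
        intro y hy
        have := hbnd y hy
        simp only [Function.comp_apply, decide_eq_true_eq]
        omega
      rw [hnone, hlev, List.find?_cons_of_pos
        (by simp only [Function.comp_apply, decide_eq_true_eq]; omega)]
      simp
    · -- hd = 7 : t = 7*10^k + tl
      rw [h4] at hmod
      have hge : 7 * 10 ^ k ≤ t := by omega
      have hnone : (pvLev k).find? ((fun y => decide (t ≤ y)) ∘ (fun y => 4 * 10 ^ k + y)) = none := by
        rw [List.find?_eq_none]
        intro y hy
        have := hbnd y hy
        simp only [Function.comp_apply, decide_eq_true_eq]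
        omega
      rw [hnone]
      have hcong : ((fun y => decide (t ≤ y)) ∘ (fun y => 7 * 10 ^ k + y))
          = fun y => decide (PySem.Int.mod t (10 ^ k) ≤ y) := by
        funext y; simp only [Function.comp_apply]; congr 1
        simp only [eq_iff_iff]; omega
      rw [hcong, ← pvG_correct k]
      cases hg : pvG k (PySem.Int.mod t (10 ^ k)) <;> simp
    · -- hd ≥ 8 : t ≥ 8*10^k, nothing matches
      have ht : 8 * 10 ^ k ≤ t := (PySem.Int.le_floordiv_iff_mul_le hp).mp (by omega)
      have hn1 : (pvLev k).find? ((fun y => decide (t ≤ y)) ∘ (fun y => 4 * 10 ^ k + y)) = none := by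
        rw [List.find?_eq_none]; intro y hy
        have := hbnd y hy; simp only [Function.comp_apply, decide_eq_true_eq]; omega
      have hn2 : (pvLev k).find? ((fun y => decide (t ≤ y)) ∘ (fun y => 7 * 10 ^ k + y)) = none := by
        rw [List.find?_eq_none]; intro y hy
        have := hbnd y hy; simp only [Function.comp_apply, decide_eq_true_eq]; omega
      rw [hn1, hn2]
      simp

-- find? over a concatenation of levels = first successful level
theorem pvFind_flatMap (p : Int → Bool) : ∀ (ks : List Nat),
    (ks.flatMap pvLev).find? p = ks.findSome? (fun k => (pvLev k).find? p)
  | [] => rfl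
  | k :: ks => by
    simp only [List.flatMap_cons, List.find?_append, List.findSome?_cons, pvFind_flatMap p ks]
    cases (pvLev k).find? p <;> simp [Option.or]

theorem pvNextLucky_eq (x : Int) :
    pvNextLucky x = pvFull.find? (fun y => decide (x ≤ y)) := by
  rw [pvNextLucky, pvFull, pvFind_flatMap]
  congr 1
  funext k
  exact pvG_correct k x

-- A's control flow, re-expressed as structural recursion on the lucky list
def pvACore : List Int → Int → Int → Int
  | [], _, _ => 0
  | x :: xs, l, r =>
    if x < l then pvACore xs l r
    else if r ≤ x then x * (r - l + 1)
    else x * (x - l + 1) + pvAWhile xs x r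

-- A's pointer-based body = pvACore (no sortedness needed)
theorem pvSolveCore_eq_ACore : ∀ (L : List Int) (l r : Int), l ≤ r →
    pvSolveCore L l r = pvACore L l r := by
  intro L
  induction L with
  | nil => intro l r _; simp [pvSolveCore, pvACore, pvGetNext, PySem.List.pyGet?]
  | cons x xs ih =>
    intro l r hlr
    by_cases hx : x < l
    · have hxr : x < r := lt_of_lt_of_le hx hlr
      have h1 : pvGetNext (x :: xs) l = pvGetNext xs l + 1 := by simp [pvGetNext, hx]
      have h2 : pvGetNext (x :: xs) r = pvGetNext xs r + 1 := by simp [pvGetNext, hxr]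
      have hdrop : ∀ k : Nat, (x :: xs).drop ((k + 1) + 1) = xs.drop (k + 1) := fun _ => rfl
      have hget : ∀ k : Nat, PySem.List.pyGet? (x :: xs) ((↑(k + 1) : Int)) = PySem.List.pyGet? xs (↑k : Int) := by
        intro k; simp [PySem.List.pyGet?_natCast]
      simp only [pvSolveCore, h1, h2, hget, hdrop, Nat.add_right_cancel_iff, pvACore, if_pos hx]
      exact ih l r hlr
    · have h1 : pvGetNext (x :: xs) l = 0 := by simp [pvGetNext, hx]
      by_cases hr : r ≤ x
      · have h2 : pvGetNext (x :: xs) r = 0 := by simp [pvGetNext, not_lt.mpr hr]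
        simp [pvSolveCore, h1, h2, pvACore, hx, hr]
      · have hxr : x < r := not_le.mp hr
        have h2 : pvGetNext (x :: xs) r = pvGetNext xs r + 1 := by simp [pvGetNext, hxr]
        simp [pvSolveCore, h1, h2, pvACore, hx, hr]

-- the tail of A's while loop is pvACore restarted just past the last bucket
theorem pvAWhile_eq_ACore (x r : Int) : ∀ (xs : List Int), (∀ y ∈ xs, x < y) →
    pvAWhile xs x r = pvACore xs (x + 1) r
  | [] => by intro _; rfl
  | y :: ys => by
    intro hall
    have hy : x < y := hall y (by simp)
    simp only [pvAWhile, pvACore, if_neg (show ¬ y < x + 1 by omega)]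
    by_cases hyr : y < r
    · rw [if_pos hyr, if_neg (not_le.mpr hyr)]
      have : min y r = y := by omega
      rw [this]; ring_nf
    · rw [if_neg hyr, if_pos (not_lt.mp hyr)]
      ring_nf

-- the jump loop agrees with pvACore on any sorted suffix aligned with pvNextLucky
theorem pvLoop_eq_ACore (r : Int) : ∀ (L : List Int) (t l : Int),
    List.Pairwise (· < ·) L → l ≤ r → (∃ y ∈ L, r ≤ y) →
    (∀ x, l ≤ x → pvNextLucky x = L.find? (fun y => decide (x ≤ y))) →
    pvLoop t l r = t + pvACore L l r
  | [], t, l => by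
    intro _ _ hex _
    rcases hex with ⟨y, hy, _⟩; cases hy
  | x :: xs, t, l => by
    intro hpw hlr hex hfind
    rcases List.pairwise_cons.mp hpw with ⟨hhd, htl⟩
    by_cases hx : x < l
    · -- head already left of the range: both sides skip it
      have hfind' : ∀ z, l ≤ z → pvNextLucky z = xs.find? (fun y => decide (z ≤ y)) := by
        intro z hz
        rw [hfind z hz, List.find?_cons_of_neg
          (by simp only [decide_eq_true_eq]; omega)]
      have hexxs : ∃ y ∈ xs, r ≤ y := by
        rcases hex with ⟨y, hy, hry⟩
        rcases List.mem_cons.mp hy with rfl | hy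
        · omega
        · exact ⟨y, hy, hry⟩
      rw [pvLoop_eq_ACore r xs t l htl hlr hexxs hfind']
      simp [pvACore, hx]
    · -- head is next_lucky(l)
      have hnl : pvNextLucky l = some x := by
        rw [hfind l le_rfl, List.find?_cons_of_pos
          (by simp only [decide_eq_true_eq]; omega)]
      rw [pvLoop, dif_pos hlr]
      split
      case _ heq => rw [hnl] at heq; cases heq
      case _ nl heq =>
      rw [hnl] at heq; injection heq with heq; subst heq
      by_cases hr : r ≤ x
      · -- final bucket
        have hmin : min r x = r := by omega
        rw [pvLoop, dif_neg (show ¬ x + 1 ≤ r by omega)]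
        simp only [pvACore, if_neg hx, if_pos hr, hmin]
      · -- middle bucket, continue past x
        have hmin : min r x = x := by omega
        have hfind' : ∀ z, x + 1 ≤ z → pvNextLucky z = xs.find? (fun y => decide (z ≤ y)) := by
          intro z hz
          rw [hfind z (by omega), List.find?_cons_of_neg
            (by simp only [decide_eq_true_eq]; omega)]
        have hexxs : ∃ y ∈ xs, r ≤ y := by
          rcases hex with ⟨y, hy, hry⟩
          rcases List.mem_cons.mp hy with rfl | hy
          · omega
          · exact ⟨y, hy, hry⟩
        rw [pvLoop_eq_ACore r xs _ (x + 1) htl (by omega) hexxs hfind']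
        rw [← pvAWhile_eq_ACore x r xs hhd]
        simp only [pvACore, if_neg hx, if_neg (not_le.mpr (show x < r by omega)), hmin]
        ring
termination_by L => L.length

-- ===== VERDICT (by name: the statement is the Claim_ definition above) =====
theorem solve_spec : Claim_equal_solve := by
  unfold Claim_equal_solve
  intro l r hDom hPre
  unfold Spec_solve
  have hr : r ≤ 2147483648 := by
    unfold Dom_solve pvDomInt at hDom
    simp only [Bool.and_eq_true, decide_eq_true_eq] at hDom
    exact hDom.2.2
  have hlr : l ≤ r := hPre
  have hex : ∃ y ∈ pvFull, r ≤ y := ⟨4444444444, pvFull_big, by omega⟩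
  have hA : solve l r = pvACore pvFull l r := by
    rw [show solve l r = pvSolveCore pvGenerateLucky l r from rfl, pvLists_eq,
      pvSolveCore_eq_ACore _ _ _ hlr]
  have hB : solve_alt l r = pvACore pvFull l r := by
    rw [show solve_alt l r = pvLoop 0 l r from rfl,
      pvLoop_eq_ACore r pvFull 0 l pvFull_pairwise hlr hex (fun x _ => pvNextLucky_eq x)]
    ring
  rw [hA, hB]
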